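-- pv_equiv track=rewrite | github.com/q-inho/qave | viewer/scripts/check_circuit_lens.py | compact_gate_token
-- ===== SOURCE A (Python) =====
-- def compact_gate_token(raw_gate_name: str, operation_id: str) -> str:
--     """Compact gate token.
--
--     Args:
--         raw_gate_name: Input value for this computation.
--         operation_id: Input value for this computation.
--
--     Returns:
--         The computed string value.
--     """
--     source = raw_gate_name if raw_gate_name else operation_id
--     if not source:
--         return "U"
--     normalized = "".join(ch if ch.isalnum() else " " for ch in source.upper()).strip()
--     if not normalized:
--         return "U"
--     token = normalized.split()[0]
--     return token[:4] if token else "U"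
-- ===== SOURCE B (Python) =====
-- def compact_gate_token(raw_gate_name: str, operation_id: str) -> str:
--     source = raw_gate_name if raw_gate_name else operation_id
--     buf = ""
--     started = False
--     for ch in source.upper():
--         if ch.isalnum():
--             if len(buf) == 4:
--                 break
--             buf += ch
--             started = True
--         elif started:
--             break
--     return buf if buf else "U"
-- ===== Notes on version B (the rewrite author's own statement) =====
-- stated objective: faster
-- what changed: B replaces A's build-full-normalized-string -> strip -> split -> index pipeline by a single left-to-right scan that skips leading separators and collects at most 4 alphanumeric characters of the first token, breaking out of the loop as soon as the token is complete.
import Mathlib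
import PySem

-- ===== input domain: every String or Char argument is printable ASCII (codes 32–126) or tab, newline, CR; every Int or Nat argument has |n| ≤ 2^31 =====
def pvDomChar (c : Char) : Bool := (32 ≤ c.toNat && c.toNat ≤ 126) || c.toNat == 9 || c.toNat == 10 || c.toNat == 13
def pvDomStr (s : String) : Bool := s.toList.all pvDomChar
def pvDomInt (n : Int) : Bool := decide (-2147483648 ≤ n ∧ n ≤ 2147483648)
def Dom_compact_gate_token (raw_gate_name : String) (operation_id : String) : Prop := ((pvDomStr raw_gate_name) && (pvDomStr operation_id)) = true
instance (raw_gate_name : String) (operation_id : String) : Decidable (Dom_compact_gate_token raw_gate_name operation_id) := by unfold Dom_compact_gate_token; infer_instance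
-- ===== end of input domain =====

-- B computes the same 4-char token by a single scan with early exit instead of A's normalize/strip/split pipeline (objective: faster, measured constant-factor win from the early break and no intermediate string).

-- ===== PORT A =====
-- literal port: normalized = "".join(ch if ch.isalnum() else " " for ch in source.upper()).strip()
def compact_gate_token (raw_gate_name : String) (operation_id : String) : String :=
  let source := if raw_gate_name = "" then operation_id else raw_gate_name
  if source = "" then "U"
  else
    let normalized : List Char :=
      PySem.Chars.strip ((PySem.Chars.upper source.toList).map
        (fun ch => if PySem.Chars.isalnum ch then ch else ' '))
    if normalized = [] then "U"
    else
      match PySem.List.pyGet? (PySem.Chars.split₀ normalized) (0 : Int) with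
      | none => "U"   -- unreachable: normalized is non-empty and stripped, so split() is non-empty (Python would raise IndexError here)
      | some token => if token = [] then "U" else String.mk (PySem.Chars.slice token none (some 4))

-- ===== PORT B =====
-- the for-loop of Source B: started flag + buffer of at most 4 chars, break on a separator after the token started or when the buffer is full
def pvScan : List Char → Bool → List Char → List Char
  | [], _, buf => buf
  | c :: rest, started, buf =>
    if PySem.Chars.isalnum c then
      if buf.length = 4 then buf
      else pvScan rest true (buf ++ [c])
    else if started then buf
    else pvScan rest started buf

def compact_gate_token_alt (raw_gate_name : String) (operation_id : String) : String :=
  let source := if raw_gate_name = "" then operation_id else raw_gate_name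
  let buf := pvScan (PySem.Chars.upper source.toList) false []
  if buf = [] then "U" else String.mk buf

-- ===== PRECONDITION & SPEC =====
def Spec_compact_gate_token (raw_gate_name : String) (operation_id : String) (out : String) : Prop := out = compact_gate_token_alt raw_gate_name operation_id
instance (raw_gate_name : String) (operation_id : String) (out : String) : Decidable (Spec_compact_gate_token raw_gate_name operation_id out) := by unfold Spec_compact_gate_token; infer_instance

-- ===== CLAIM (what is proved, stated in full; the proofs are below) =====
def Claim_equal_compact_gate_token : Prop := ∀ (raw_gate_name : String) (operation_id : String), Dom_compact_gate_token raw_gate_name operation_id → Spec_compact_gate_token raw_gate_name operation_id (compact_gate_token raw_gate_name operation_id)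

-- ===== LEMMAS AND PROOFS =====

-- an alphanumeric character is never whitespace
theorem pv_alnum_isspace (c : Char) (h : PySem.Chars.isalnum c = true) :
    PySem.Chars.isspace c = false := by
  have e1 : 'A'.val.toNat = 65 := rfl
  have e2 : 'Z'.val.toNat = 90 := rfl
  have e3 : 'a'.val.toNat = 97 := rfl
  have e4 : 'z'.val.toNat = 122 := rfl
  have e5 : '0'.val.toNat = 48 := rfl
  have e6 : '9'.val.toNat = 57 := rfl
  simp only [PySem.Chars.isalnum, PySem.Chars.isalpha, PySem.Chars.isdigit, PySem.Chars.isupper,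
    PySem.Chars.islower, PySem.Chars.isspace, Char.le_def, Bool.or_eq_true, Bool.and_eq_true,
    decide_eq_true_eq] at h ⊢
  simp only [Bool.or_eq_false_iff, Bool.and_eq_false_iff, decide_eq_false_iff_not, not_le,
    Char.toNat, UInt32.le_iff_toNat_le] at *
  omega

-- the blanking map of A turns "is whitespace" into "is not alphanumeric"
theorem pv_blank_isspace (c : Char) :
    PySem.Chars.isspace (if PySem.Chars.isalnum c then c else ' ') = !PySem.Chars.isalnum c := by
  by_cases h : PySem.Chars.isalnum c = true
  · simp [h, pv_alnum_isspace c h]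
  · have h' : PySem.Chars.isalnum c = false := by simpa using h
    rw [if_neg h, h']
    decide

theorem pv_dropWhile_head {α : Type} (q : α → Bool) (cs : List α) (d : α) (t : List α)
    (h : cs.dropWhile q = d :: t) : q d = false := by
  induction cs with
  | nil => simp at h
  | cons c cs ih =>
    rw [List.dropWhile_cons] at h
    by_cases hq : q c = true
    · rw [if_pos hq] at h; exact ih h
    · rw [if_neg hq] at h
      cases h
      simpa using hq

-- split₀.go: the accumulator factors out
theorem pv_go_acc (s : List Char) : ∀ (cur : List Char) (acc : List (List Char)),
    PySem.Chars.split₀.go s cur acc = acc.reverse ++ PySem.Chars.split₀.go s cur [] := by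
  induction s with
  | nil => intro cur acc; rw [PySem.Chars.split₀.go, PySem.Chars.split₀.go]; split <;> simp
  | cons c s ih =>
    intro cur acc
    rw [PySem.Chars.split₀.go]
    conv_rhs => rw [PySem.Chars.split₀.go]
    split
    · split
      · exact ih [] acc
      · rw [ih [] (cur.reverse :: acc), ih [] [cur.reverse]]; simp
    · exact ih (c :: cur) acc

-- split₀.go with a started word: the head of the result is that word completed
theorem pv_go_head (s : List Char) : ∀ (cur : List Char), cur ≠ [] →
    (PySem.Chars.split₀.go s cur []).head? =
      some (cur.reverse ++ s.takeWhile (fun c => !PySem.Chars.isspace c)) := by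
  induction s with
  | nil =>
    intro cur hcur
    rw [PySem.Chars.split₀.go]
    simp [List.isEmpty_iff, hcur]
  | cons c s ih =>
    intro cur hcur
    rw [PySem.Chars.split₀.go]
    by_cases hc : PySem.Chars.isspace c = true
    · simp only [hc, if_pos, List.isEmpty_iff, hcur, if_neg, List.takeWhile_cons]
      rw [pv_go_acc s [] [cur.reverse]]
      simp [hcur, hc]
    · simp only [hc, List.takeWhile_cons, if_neg, Bool.not_eq_true]
      rw [ih (c :: cur) (by simp)]
      simp [hc]

-- head of split() of a string starting with a non-space character
theorem pv_split₀_head_cons (d : Char) (s : List Char) (hd : PySem.Chars.isspace d = false) :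
    (PySem.Chars.split₀ (d :: s)).head? =
      some ((d :: s).takeWhile (fun c => !PySem.Chars.isspace c)) := by
  show (PySem.Chars.split₀.go (d :: s) [] []).head? = _
  rw [PySem.Chars.split₀.go]
  simp only [hd, Bool.false_eq_true, if_neg, if_false]
  rw [pv_go_head s [d] (by simp)]
  simp [List.takeWhile_cons, hd]

-- taking the first whitespace-free run commutes with stripping trailing whitespace
theorem pv_takeWhile_revdrop (y : List Char) :
    ((y.dropWhile PySem.Chars.isspace).reverse).takeWhile (fun c => !PySem.Chars.isspace c) =
      (y.reverse).takeWhile (fun c => !PySem.Chars.isspace c) := by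
  induction y with
  | nil => simp
  | cons c t ih =>
    by_cases hc : PySem.Chars.isspace c = true
    · rw [List.dropWhile_cons, if_pos hc, ih]
      rw [List.reverse_cons, List.takeWhile_append]
      split
      · next h =>
          have h2 := (List.takeWhile_prefix (p := fun c => !PySem.Chars.isspace c)
            (l := t.reverse)).eq_of_length h
          simp [h2, hc]
      · rfl
    · simp [List.dropWhile_cons, hc]

theorem pv_takeWhile_rstrip (x : List Char) :
    (PySem.Chars.rstrip x).takeWhile (fun c => !PySem.Chars.isspace c) =
      x.takeWhile (fun c => !PySem.Chars.isspace c) := by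
  have := pv_takeWhile_revdrop x.reverse
  simpa [PySem.Chars.rstrip] using this

theorem pv_rstrip_prefix (x : List Char) : PySem.Chars.rstrip x <+: x := by
  have h := List.dropWhile_suffix (l := x.reverse) PySem.Chars.isspace
  have := List.reverse_prefix.mpr h
  simpa using this

theorem pv_head?_prefix {α : Type} {l₁ l₂ : List α} (h : l₁ <+: l₂) (hne : l₁ ≠ []) :
    l₂.head? = l₁.head? := by
  obtain ⟨t, rfl⟩ := h
  cases l₁ with
  | nil => exact absurd rfl hne
  | cons a l => simp

theorem pv_rstrip_ne_nil (x : List Char) (d : Char) (hd : d ∈ x)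
    (h : PySem.Chars.isspace d = false) : PySem.Chars.rstrip x ≠ [] := by
  simp only [PySem.Chars.rstrip, ne_eq, List.reverse_eq_nil_iff, List.dropWhile_eq_nil_iff]
  intro hall
  have := hall d (by simpa using hd)
  rw [this] at h; exact absurd h (by simp)

-- B's loop after the token has started: it appends at most the rest of the current run
theorem pv_scan_inv (ds : List Char) : ∀ (buf : List Char), buf.length ≤ 4 →
    pvScan ds true buf = buf ++ (ds.takeWhile PySem.Chars.isalnum).take (4 - buf.length) := by
  induction ds with
  | nil => intro buf _; simp [pvScan]
  | cons c rest ih =>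
    intro buf hb
    rw [pvScan]
    by_cases hc : PySem.Chars.isalnum c = true
    · simp only [hc, if_pos, List.takeWhile_cons, if_true]
      by_cases h4 : buf.length = 4
      · simp [h4]
      · have : (buf ++ [c]).length ≤ 4 := by simp; omega
        rw [if_neg h4, ih (buf ++ [c]) this]
        have h5 : 4 - buf.length = (4 - (buf ++ [c]).length) + 1 := by simp; omega
        simp [h5, List.take_succ_cons]
    · simp [hc, List.takeWhile_cons]

-- B's loop from the start computes the first 4 characters of the first alphanumeric run
theorem pv_scan_run (cs : List Char) :
    pvScan cs false [] =
      ((cs.dropWhile (fun c => !PySem.Chars.isalnum c)).takeWhile PySem.Chars.isalnum).take 4 := by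
  induction cs with
  | nil => simp [pvScan]
  | cons c rest ih =>
    by_cases hc : PySem.Chars.isalnum c = true
    · have h1 : pvScan (c :: rest) false [] = pvScan rest true [c] := by
        rw [pvScan]; simp [hc]
      rw [h1, pv_scan_inv rest [c] (by simp), List.dropWhile_cons]
      rw [show (4:Nat) = 3 + 1 from rfl]
      simp [hc, List.takeWhile_cons, List.take_succ_cons]
    · have h1 : pvScan (c :: rest) false [] = pvScan rest false [] := by
        rw [pvScan]; simp [hc]
      rw [h1, ih, List.dropWhile_cons]
      simp [hc]

-- the main per-character-list equivalence (cs = source.upper() as a char list)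
theorem pv_main (cs : List Char) :
    (let normalized : List Char :=
      PySem.Chars.strip (cs.map (fun ch => if PySem.Chars.isalnum ch then ch else ' '))
     if normalized = [] then "U"
     else
       match PySem.List.pyGet? (PySem.Chars.split₀ normalized) (0 : Int) with
       | none => "U"
       | some token => if token = [] then "U" else String.mk (PySem.Chars.slice token none (some 4))) =
    (let buf := pvScan cs false []
     if buf = [] then "U" else String.mk buf) := by
  simp only
  rw [pv_scan_run cs]
  have hpred : (PySem.Chars.isspace ∘ fun ch => if PySem.Chars.isalnum ch then ch else ' ')
      = fun c => !PySem.Chars.isalnum c := by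
    funext c; exact pv_blank_isspace c
  have hstrip : PySem.Chars.strip (cs.map (fun ch => if PySem.Chars.isalnum ch then ch else ' '))
      = PySem.Chars.rstrip ((cs.dropWhile (fun c => !PySem.Chars.isalnum c)).map
          (fun ch => if PySem.Chars.isalnum ch then ch else ' ')) := by
    rw [PySem.Chars.strip, PySem.Chars.lstrip, List.dropWhile_map, hpred]
  rw [hstrip]
  cases hds : cs.dropWhile (fun c => !PySem.Chars.isalnum c) with
  | nil => simp [PySem.Chars.rstrip]
  | cons d t =>
    have hpd : PySem.Chars.isalnum d = true := by
      have := pv_dropWhile_head (fun c => !PySem.Chars.isalnum c) cs d t hds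
      simpa using this
    have hsd : PySem.Chars.isspace d = false := pv_alnum_isspace d hpd
    have hbd : (if PySem.Chars.isalnum d then d else ' ') = d := if_pos hpd
    set x := ((d :: t).map (fun ch => if PySem.Chars.isalnum ch then ch else ' ')) with hx
    have hxhead : x.head? = some d := by rw [hx]; simp [hbd]
    have hne : PySem.Chars.rstrip x ≠ [] :=
      pv_rstrip_ne_nil x d (by rw [hx]; simp [hbd]) hsd
    have hNhead : (PySem.Chars.rstrip x).head? = some d := by
      rw [pv_head?_prefix (pv_rstrip_prefix x) hne] at hxhead; exact hxhead
    obtain ⟨nr, hN⟩ : ∃ nr, PySem.Chars.rstrip x = d :: nr := by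
      cases hc : PySem.Chars.rstrip x with
      | nil => exact absurd hc hne
      | cons a b => rw [hc] at hNhead; simp at hNhead; exact ⟨b, by rw [hNhead]⟩
    rw [hN, if_neg (by simp)]
    have hsplit : (PySem.Chars.split₀ (d :: nr)).head? =
        some ((d :: nr).takeWhile (fun c => !PySem.Chars.isspace c)) :=
      pv_split₀_head_cons d nr hsd
    have hget : PySem.List.pyGet? (PySem.Chars.split₀ (d :: nr)) (0 : Int) =
        (PySem.Chars.split₀ (d :: nr)).head? := by
      simp [PySem.List.pyGet?]
      cases PySem.Chars.split₀ (d :: nr) <;> simp [PySem.List.pyIdx?]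
    have htok : (d :: nr).takeWhile (fun c => !PySem.Chars.isspace c)
        = (d :: t).takeWhile PySem.Chars.isalnum := by
      rw [← hN, pv_takeWhile_rstrip x, hx, List.takeWhile_map]
      have : ((fun c => !PySem.Chars.isspace c) ∘ fun ch => if PySem.Chars.isalnum ch then ch else ' ')
          = PySem.Chars.isalnum := by
        funext c; simp [pv_blank_isspace c]
      rw [this]
      calc List.map (fun ch => if PySem.Chars.isalnum ch = true then ch else ' ')
            ((d :: t).takeWhile PySem.Chars.isalnum)
          = List.map id ((d :: t).takeWhile PySem.Chars.isalnum) :=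
            List.map_congr_left (fun a ha => by rw [if_pos (List.mem_takeWhile_imp ha)]; rfl)
        _ = (d :: t).takeWhile PySem.Chars.isalnum := List.map_id _
    rw [hget, hsplit, htok]
    have htw : (d :: t).takeWhile PySem.Chars.isalnum = d :: t.takeWhile PySem.Chars.isalnum := by
      simp [List.takeWhile_cons, hpd]
    rw [htw]
    have hmatch : (match some (d :: t.takeWhile PySem.Chars.isalnum) with
        | none => "U"
        | some token => if token = [] then "U" else String.mk (PySem.Chars.slice token none (some 4)))
        = if (d :: t.takeWhile PySem.Chars.isalnum) = [] then "U"
          else String.mk (PySem.Chars.slice (d :: t.takeWhile PySem.Chars.isalnum) none (some 4)) := rfl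
    rw [hmatch, if_neg (by simp), if_neg (by simp)]
    congr 1
    rw [PySem.Chars.slice_eq_listSlice, PySem.List.slice_to _ (by norm_num)]
    rfl

-- ===== VERDICT (by name: the statement is the Claim_ definition above) =====
theorem compact_gate_token_spec : Claim_equal_compact_gate_token := by
  intro raw op _
  unfold Spec_compact_gate_token compact_gate_token compact_gate_token_alt
  set source := if raw = "" then op else raw with hs
  by_cases h : source = ""
  · simp [h, PySem.Chars.upper, pvScan]
  · rw [if_neg h]
    exact pv_main (PySem.Chars.upper source.toList)
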